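-- pv_equiv track=rewrite | github.com/phajnala-dotcom/voicelibri | scripts/aoib_sync_voicelibri_assets_catalog_xlsx.py | _subcategory_from_path_value
-- ===== SOURCE A (Python) =====
-- def _norm(p: str) -> str:
--     return p.replace('\\', '/').replace('//', '/')
--
-- def _subcategory_from_path_value(path_value: str) -> str:
--     s = _norm(path_value).strip()
--     for root in ('realistic/', 'cinematic_&_foley/', 'music/'):
--         if s.startswith(root):
--             rel = s[len(root):]
--             parts = rel.split('/')
--             if len(parts) > 1:
--                 candidate = parts[1]
--                 if candidate.lower().endswith(('.ogg', '.wav')):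
--                     return ''
--                 return candidate
--             return ''
--     return ''
-- ===== SOURCE B (Python) =====
-- _ROOTS = {'realistic', 'cinematic_&_foley', 'music'}
--
-- def _subcategory_from_path_value(path_value: str) -> str:
--     s = path_value.replace('\\', '/').replace('//', '/').strip()
--     segs = s.split('/')
--     if len(segs) > 2 and segs[0] in _ROOTS:
--         candidate = segs[2]
--         if not candidate.lower().endswith(('.ogg', '.wav')):
--             return candidate
--     return ''
-- ===== Notes on version B (the rewrite author's own statement) =====
-- stated objective: idiomatic
-- what changed: B tokenizes the normalized path once with a single split('/') and reads segment 0 (root-name set membership) and segment 2 directly, instead of A's loop of three startswith tests each followed by a slice and its own re-split.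
import Mathlib
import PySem

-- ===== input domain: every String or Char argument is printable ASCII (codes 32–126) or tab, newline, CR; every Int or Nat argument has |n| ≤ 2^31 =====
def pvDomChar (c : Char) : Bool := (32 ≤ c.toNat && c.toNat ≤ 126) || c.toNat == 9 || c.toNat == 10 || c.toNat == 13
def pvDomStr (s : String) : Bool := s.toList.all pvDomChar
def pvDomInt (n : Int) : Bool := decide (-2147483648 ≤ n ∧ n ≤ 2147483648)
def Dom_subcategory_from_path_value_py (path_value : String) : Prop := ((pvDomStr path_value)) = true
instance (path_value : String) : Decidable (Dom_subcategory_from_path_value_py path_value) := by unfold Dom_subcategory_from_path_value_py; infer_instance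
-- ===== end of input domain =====

-- B replaces A's three startswith/slice/re-split iterations by one split('/') and direct segment reads (idiomatic; same cost).

-- ===== PORT A =====
-- the for-loop over the three root prefixes, with its early returns
def pvALoop : List String → String → String
  | [], _ => ""
  | root :: roots, s =>
    if PySem.Str.startswith s root then
      let rel := PySem.Str.slice s (some (PySem.Str.len root)) none
      let parts := (PySem.Chars.splitOn rel.toList ['/']).map String.ofList
      if 1 < parts.length then
        let candidate := parts.getD 1 ""
        if PySem.Str.endswith (PySem.Str.lower candidate) ".ogg" ||
           PySem.Str.endswith (PySem.Str.lower candidate) ".wav" then ""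
        else candidate
      else ""
    else pvALoop roots s

def subcategory_from_path_value_py (path_value : String) : String :=
  let s := PySem.Str.strip (PySem.Str.replace (PySem.Str.replace path_value "\\" "/") "//" "/")
  pvALoop ["realistic/", "cinematic_&_foley/", "music/"] s

-- ===== PORT B =====
-- segment-based body of B, applied to the normalized, stripped path
def pvBPick (s : String) : String :=
  let segs := (PySem.Chars.splitOn s.toList ['/']).map String.ofList
  if 2 < segs.length &&
     PySem.Set.contains (PySem.Set.ofList ["realistic", "cinematic_&_foley", "music"]) (segs.getD 0 "") then
    let candidate := segs.getD 2 ""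
    if PySem.Str.endswith (PySem.Str.lower candidate) ".ogg" ||
       PySem.Str.endswith (PySem.Str.lower candidate) ".wav" then ""
    else candidate
  else ""

def subcategory_from_path_value_py_alt (path_value : String) : String :=
  pvBPick (PySem.Str.strip (PySem.Str.replace (PySem.Str.replace path_value "\\" "/") "//" "/"))

-- ===== PRECONDITION & SPEC =====
def Spec_subcategory_from_path_value_py (path_value : String) (out : String) : Prop := out = subcategory_from_path_value_py_alt path_value
instance (path_value : String) (out : String) : Decidable (Spec_subcategory_from_path_value_py path_value out) := by unfold Spec_subcategory_from_path_value_py; infer_instance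

-- ===== CLAIM (what is proved, stated in full; the proofs are below) =====
def Claim_equal_subcategory_from_path_value_py : Prop := ∀ (path_value : String), Dom_subcategory_from_path_value_py path_value → Spec_subcategory_from_path_value_py path_value (subcategory_from_path_value_py path_value)

-- ===== LEMMAS AND PROOFS =====

-- simple structural recursion computing Python's split on the single separator '/'
def splitSlash : List Char → List (List Char)
  | [] => [[]]
  | c :: r =>
    if c = '/' then [] :: splitSlash r
    else
      match splitSlash r with
      | [] => [[c]]
      | h :: t => (c :: h) :: t

theorem splitSlash_ne_nil (l : List Char) : splitSlash l ≠ [] := by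
  induction l with
  | nil => simp [splitSlash]
  | cons c r ih =>
    simp only [splitSlash]
    split
    · simp
    · split
      · simp
      · simp

theorem go_eq_splitSlash (fuel : Nat) (l cur : List Char) (acc : List (List Char))
    (h : l.length ≤ fuel) :
    PySem.Chars.splitOn.go ['/'] fuel l cur acc
      = acc.reverse ++ (splitSlash l).modifyHead (cur.reverse ++ ·) := by
  induction fuel generalizing l cur acc with
  | zero =>
    have : l = [] := by cases l <;> simp_all
    subst this
    simp [PySem.Chars.splitOn.go, splitSlash]
  | succ f ih =>
    cases l with
    | nil => simp [PySem.Chars.splitOn.go, splitSlash]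
    | cons c rest =>
      by_cases hc : c = '/'
      · subst hc
        have hpre : List.isPrefixOf ['/'] ('/' :: rest) = true := by simp [List.isPrefixOf]
        rw [PySem.Chars.splitOn.go]
        simp only [hpre, if_true]
        rw [show List.drop (['/'] : List Char).length ('/' :: rest) = rest from rfl]
        rw [ih rest [] (cur.reverse :: acc) (by simpa using Nat.le_of_succ_le_succ h)]
        simp only [splitSlash, List.reverse_cons, List.append_assoc,
          List.reverse_nil, List.nil_append, List.singleton_append]
        cases hsr : splitSlash rest <;> simp
      · have hpre : List.isPrefixOf ['/'] (c :: rest) = false := by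
          simp [List.isPrefixOf]; exact fun h' => (hc h'.symm).elim
        rw [PySem.Chars.splitOn.go]
        simp only [hpre, Bool.false_eq_true, if_false]
        rw [ih rest (c :: cur) acc (by simpa using Nat.le_of_succ_le_succ h)]
        simp only [splitSlash, hc, if_false]
        congr 1
        cases hs : splitSlash rest with
        | nil => exact absurd hs (splitSlash_ne_nil rest)
        | cons h t => simp

theorem splitOn_eq_splitSlash (l : List Char) :
    PySem.Chars.splitOn l ['/'] = splitSlash l := by
  rw [PySem.Chars.splitOn, go_eq_splitSlash (l.length + 1) l [] [] (by omega)]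
  cases hs : splitSlash l with
  | nil => exact absurd hs (splitSlash_ne_nil l)
  | cons h t => simp

theorem splitSlash_append (a b : List Char) (ha : '/' ∉ a) :
    splitSlash (a ++ '/' :: b) = a :: splitSlash b := by
  induction a with
  | nil => simp [splitSlash]
  | cons c r ih =>
    have hc : c ≠ '/' := fun h => ha (h ▸ List.mem_cons_self ..)
    simp only [List.cons_append, splitSlash, hc, if_false]
    rw [ih (fun h => ha (List.mem_cons_of_mem _ h))]

theorem splitSlash_prefix (l a : List Char) (rest : List (List Char))
    (h : splitSlash l = a :: rest) (hr : rest ≠ []) : (a ++ ['/']) <+: l := by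
  induction l generalizing a rest with
  | nil =>
    simp only [splitSlash] at h
    obtain ⟨h1, h2⟩ := List.cons.inj h
    exact absurd h2.symm hr
  | cons c r ih =>
    by_cases hc : c = '/'
    · subst hc
      simp only [splitSlash] at h
      obtain ⟨h1, h2⟩ := List.cons.inj h
      subst h1
      exact ⟨r, by simp⟩
    · simp only [splitSlash, if_neg hc] at h
      cases hs : splitSlash r with
      | nil => exact absurd hs (splitSlash_ne_nil r)
      | cons h0 t =>
        rw [hs] at h
        obtain ⟨h1, h2⟩ := List.cons.inj h
        subst h1
        have hp := ih h0 t hs (by rw [h2]; exact hr)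
        rw [List.cons_append, List.cons_prefix_cons]
        exact ⟨rfl, hp⟩

-- B's pick on a string whose first segment is a root, expressed through the remainder rel
theorem pick_of_split (s : String) (rootL rel : List Char)
    (hr : '/' ∉ rootL)
    (hmem : PySem.Set.contains (PySem.Set.ofList ["realistic", "cinematic_&_foley", "music"]) (String.ofList rootL) = true)
    (hL : s.toList = (rootL ++ ['/']) ++ rel) :
    pvBPick s =
      (if 1 < ((PySem.Chars.splitOn rel ['/']).map String.ofList).length then
         if PySem.Str.endswith (PySem.Str.lower (((PySem.Chars.splitOn rel ['/']).map String.ofList).getD 1 "")) ".ogg" ||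
            PySem.Str.endswith (PySem.Str.lower (((PySem.Chars.splitOn rel ['/']).map String.ofList).getD 1 "")) ".wav" then ""
         else ((PySem.Chars.splitOn rel ['/']).map String.ofList).getD 1 ""
       else "") := by
  unfold pvBPick
  rw [splitOn_eq_splitSlash, hL, List.append_assoc, List.singleton_append,
    splitSlash_append _ _ hr, ← splitOn_eq_splitSlash]
  simp only [List.map_cons, List.length_cons, List.getD_cons_zero, hmem, Bool.and_true,
    List.getD_cons_succ]
  by_cases hlen : 1 < ((PySem.Chars.splitOn rel ['/']).map String.ofList).length
  · rw [if_pos (by simpa using (by omega : 2 < ((PySem.Chars.splitOn rel ['/']).map String.ofList).length + 1)), if_pos hlen]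
  · rw [if_neg (by simpa using (by omega : ¬ 2 < ((PySem.Chars.splitOn rel ['/']).map String.ofList).length + 1)), if_neg hlen]

-- on a string with no root prefix, B's pick is ''
theorem pick_of_no_prefix (s : String)
    (h1 : ¬ PySem.Str.startswith s "realistic/" = true)
    (h2 : ¬ PySem.Str.startswith s "cinematic_&_foley/" = true)
    (h3 : ¬ PySem.Str.startswith s "music/" = true) :
    pvBPick s = "" := by
  unfold pvBPick
  rw [splitOn_eq_splitSlash]
  cases hX : splitSlash s.toList with
  | nil => exact absurd hX (splitSlash_ne_nil _)
  | cons a rest =>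
    cases rest with
    | nil => simp
    | cons b rest' =>
      show (if (decide (2 < (List.map String.ofList (a :: b :: rest')).length) &&
              PySem.Set.contains (PySem.Set.ofList ["realistic", "cinematic_&_foley", "music"])
                ((List.map String.ofList (a :: b :: rest')).getD 0 "")) = true then
          (if (PySem.Str.endswith (PySem.Str.lower ((List.map String.ofList (a :: b :: rest')).getD 2 "")) ".ogg" ||
               PySem.Str.endswith (PySem.Str.lower ((List.map String.ofList (a :: b :: rest')).getD 2 "")) ".wav") = true then ""
           else (List.map String.ofList (a :: b :: rest')).getD 2 "")
        else "") = ""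
      by_cases hmem : PySem.Set.contains (PySem.Set.ofList ["realistic", "cinematic_&_foley", "music"])
          (((a :: b :: rest').map String.ofList).getD 0 "") = true
      · exfalso
        have hset : PySem.Set.ofList ["realistic", "cinematic_&_foley", "music"]
            = ["realistic", "cinematic_&_foley", "music"] := by decide
        rw [hset] at hmem
        have hcases : String.ofList a = "realistic" ∨ String.ofList a = "cinematic_&_foley" ∨
            String.ofList a = "music" := by
          simpa [PySem.Set.contains] using hmem
        have hpre : (a ++ ['/']) <+: s.toList :=
          splitSlash_prefix s.toList a (b :: rest') hX (by simp)
        have hsw : ∀ r : String, a = r.toList → PySem.Str.startswith s (String.ofList (r.toList ++ ['/'])) = true := by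
          intro r har
          simp only [PySem.Str.startswith, String.toList_ofList]
          exact (PySem.Chars.startswith_iff _ _).mpr (har ▸ hpre)
        rcases hcases with h | h | h
        · have ha : a = ("realistic" : String).toList := by
            have := congrArg String.toList h; simpa using this
          exact h1 (by simpa using hsw "realistic" ha)
        · have ha : a = ("cinematic_&_foley" : String).toList := by
            have := congrArg String.toList h; simpa using this
          exact h2 (by simpa using hsw "cinematic_&_foley" ha)
        · have ha : a = ("music" : String).toList := by
            have := congrArg String.toList h; simpa using this
          exact h3 (by simpa using hsw "music" ha)
      · simp only [Bool.not_eq_true] at hmem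
        rw [hmem, Bool.and_false]
        simp

-- one positive branch of A's loop equals B's pick
theorem branch_eq (s : String) (root slash : String) (n : Int)
    (hr : '/' ∉ root.toList)
    (hsl : slash.toList = root.toList ++ ['/'])
    (hn : n = PySem.Str.len slash) (hn' : n.toNat = root.toList.length + 1)
    (hmem : PySem.Set.contains (PySem.Set.ofList ["realistic", "cinematic_&_foley", "music"]) root = true)
    (h : PySem.Str.startswith s slash = true) :
    (if 1 < ((PySem.Chars.splitOn (PySem.Str.slice s (some (PySem.Str.len slash)) none).toList ['/']).map String.ofList).length then
       if PySem.Str.endswith (PySem.Str.lower (((PySem.Chars.splitOn (PySem.Str.slice s (some (PySem.Str.len slash)) none).toList ['/']).map String.ofList).getD 1 "")) ".ogg" ||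
          PySem.Str.endswith (PySem.Str.lower (((PySem.Chars.splitOn (PySem.Str.slice s (some (PySem.Str.len slash)) none).toList ['/']).map String.ofList).getD 1 "")) ".wav" then ""
       else ((PySem.Chars.splitOn (PySem.Str.slice s (some (PySem.Str.len slash)) none).toList ['/']).map String.ofList).getD 1 ""
     else "") = pvBPick s := by
  have hpre : (root.toList ++ ['/']) <+: s.toList := by
    have := (PySem.Chars.startswith_iff s.toList slash.toList).mp
      (by simpa [PySem.Str.startswith] using h)
    rwa [hsl] at this
  obtain ⟨rel, hrel⟩ := hpre
  have hroot : String.ofList root.toList = root := by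
    apply String.toList_injective; simp
  rw [pick_of_split s root.toList rel hr (by rwa [hroot]) hrel.symm]
  have hnn : 0 ≤ n := by omega
  have hslice : (PySem.Str.slice s (some (PySem.Str.len slash)) none).toList = rel := by
    rw [← hn]
    simp only [PySem.Str.slice, String.toList_ofList, PySem.Chars.slice_eq_listSlice]
    rw [PySem.List.slice_from _ hnn, ← hrel, hn']
    have hlen : root.toList.length + 1 = (root.toList ++ ['/']).length := by simp
    rw [hlen, List.drop_left]
  rw [hslice]

-- main string-level equivalence: A's prefix loop equals B's segment pick
theorem main_eq (s : String) :
    pvALoop ["realistic/", "cinematic_&_foley/", "music/"] s = pvBPick s := by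
  simp only [pvALoop]
  by_cases h1 : PySem.Str.startswith s "realistic/" = true
  · rw [if_pos h1]
    exact branch_eq s "realistic" "realistic/" 10 (by decide) (by decide) (by decide) (by decide)
      (by decide) h1
  · rw [if_neg h1]
    by_cases h2 : PySem.Str.startswith s "cinematic_&_foley/" = true
    · rw [if_pos h2]
      exact branch_eq s "cinematic_&_foley" "cinematic_&_foley/" 18 (by decide) (by decide)
        (by decide) (by decide) (by decide) h2
    · rw [if_neg h2]
      by_cases h3 : PySem.Str.startswith s "music/" = true
      · rw [if_pos h3]
        exact branch_eq s "music" "music/" 6 (by decide) (by decide) (by decide) (by decide)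
          (by decide) h3
      · rw [if_neg h3]
        exact (pick_of_no_prefix s h1 h2 h3).symm

-- ===== VERDICT (by name: the statement is the Claim_ definition above) =====
theorem subcategory_from_path_value_py_spec : Claim_equal_subcategory_from_path_value_py := by
  intro path_value _
  unfold Spec_subcategory_from_path_value_py subcategory_from_path_value_py subcategory_from_path_value_py_alt
  exact main_eq _
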